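-- pv_equiv track=rewrite | github.com/facebookresearch/optimizers | distributed_shampoo/utils/shampoo_utils.py | distribute_buffer_sizes
-- ===== SOURCE A (Python) =====
-- import heapq
-- import operator
--
-- def distribute_buffer_sizes(
--     buffer_sizes: tuple[int, ...],
--     group_size: int,
-- ) -> tuple[tuple[int, int], ...]:
--     """Distribute given buffer sizes across ranks in a group.
--
--     Buffer sizes will be rounded up for memory allocation. Buffers are distributed such that
--     total buffer sizes of each rank are as even as possible. This is currently performed
--     using a greedy algorithm. We do not currently consider computational cost
--     or kernel launching overheads.
--
--     Note: A better distribution strategy should try to minimize the delta of buffer sizes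
--     between the most and the least allocated groups.
--
--     Args:
--         buffer_sizes (tuple[int, ...]): Buffer sizes of blocks to be distributed.
--         group_size (int): Number of groups to distribute across.
--
--     Returns:
--         buffer_size_ranks (tuple[tuple[int, int], ...]): A list of tuples containing the
--             buffer size for each block and its assigned rank.
--
--     Example:
--         Assuming ALIGNMENT_BYTES = 64, given buffer_sizes = [128, 64, 500, 256], group_size = 2
--         -> buffer_size_ranks = [(128, 1), (64, 1), (512, 0), (256, 1)]
--
--         This means buffer at index 0 (size 128) is assigned to rank 1,
--         buffer at index 1 (size 64) is assigned to rank 1,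
--         buffer at index 2 (size 512) is assigned to rank 0, and
--         buffer at index 3 (size 256) is assigned to rank 1.
--     """
--     ALIGNMENT_BYTES = (
--         64  # necessary for determining buffer size, possibly hardware-dependent
--     )
--
--     # Convert each of buffer_sizes into smallest multiple of ALIGNMENT_BYTES that is >= buffer size.
--     aligned_buffer_sizes = [
--         (buffer_size + ALIGNMENT_BYTES - 1) // ALIGNMENT_BYTES * ALIGNMENT_BYTES
--         for buffer_size in buffer_sizes
--     ]
--     buffer_size_ranks = [(-1, -1)] * len(buffer_sizes)
--     allocated_buffer_sizes = [(0, group_index) for group_index in range(group_size)]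
--     heapq.heapify(allocated_buffer_sizes)
--
--     for index, aligned_buffer_size in sorted(
--         enumerate(aligned_buffer_sizes),
--         key=operator.itemgetter(1),
--         reverse=True,
--     ):
--         # Greedily find the group with the least allocated buffer size and its group index
--         # in order to allocate buffers on that group.
--         (
--             min_allocated_buffer_size,
--             min_allocated_buffer_size_group_index,
--         ) = heapq.heappop(allocated_buffer_sizes)
--
--         heapq.heappush(
--             allocated_buffer_sizes,
--             (
--                 min_allocated_buffer_size + aligned_buffer_size,
--                 min_allocated_buffer_size_group_index,
--             ),
--         )
--         buffer_size_ranks[index] = (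
--             aligned_buffer_size,
--             min_allocated_buffer_size_group_index,
--         )
--
--     return tuple(buffer_size_ranks)
-- ===== SOURCE B (Python) =====
-- def distribute_buffer_sizes(buffer_sizes, group_size):
--     ALIGNMENT_BYTES = 64
--     aligned = [
--         (b + ALIGNMENT_BYTES - 1) // ALIGNMENT_BYTES * ALIGNMENT_BYTES
--         for b in buffer_sizes
--     ]
--     result = [(-1, -1)] * len(buffer_sizes)
--     allocated = [0] * group_size
--     for index, size in sorted(enumerate(aligned), key=lambda p: p[1], reverse=True):
--         # least-loaded rank; list.index returns the lowest such rank on ties,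
--         # matching the heap's (load, rank) tuple order in A
--         group = allocated.index(min(allocated))
--         result[index] = (size, group)
--         allocated[group] += size
--     return tuple(result)
-- ===== Notes on version B (the rewrite author's own statement) =====
-- stated objective: simpler
-- what changed: Replaces the heap of (load, rank) tuples by a plain per-rank load list: each buffer is assigned to allocated.index(min(allocated)), which reproduces the heap's tie-breaking (least load, then lowest rank).
import Mathlib
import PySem

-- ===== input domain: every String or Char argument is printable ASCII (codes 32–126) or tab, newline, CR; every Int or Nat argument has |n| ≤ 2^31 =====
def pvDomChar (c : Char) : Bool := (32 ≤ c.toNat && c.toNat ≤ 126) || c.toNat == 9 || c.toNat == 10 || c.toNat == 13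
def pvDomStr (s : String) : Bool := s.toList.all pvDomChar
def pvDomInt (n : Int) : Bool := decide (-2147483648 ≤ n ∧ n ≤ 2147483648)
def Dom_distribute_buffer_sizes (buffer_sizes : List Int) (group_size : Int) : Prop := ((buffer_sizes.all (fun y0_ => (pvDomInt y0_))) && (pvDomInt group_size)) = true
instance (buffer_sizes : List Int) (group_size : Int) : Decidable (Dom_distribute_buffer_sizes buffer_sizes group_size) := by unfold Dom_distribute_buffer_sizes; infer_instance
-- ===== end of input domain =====

-- B replaces A's heap of (load, rank) tuples by a plain per-rank load list with a linear
-- min/index scan (same assignment, including tie-breaks); objective: simpler.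

-- ===== PORT A =====
-- heapq is ported at its observable level: heappop returns (and removes the first occurrence of)
-- the smallest element in Python's tuple (lexicographic) order — none on an empty heap, where
-- Python raises IndexError — and heappush appends the new element; heapify keeps the elements.
def pvHeapPop (h : List (Int × Int)) : Option ((Int × Int) × List (Int × Int)) :=
  match PySem.List.min2? h Prod.fst Prod.snd with
  | none => none
  | some m => some (m, h.erase m)

-- loop body of A: pop the least-loaded (load, rank) pair, push it back updated, record the rank
def pvStepA (st : List (Int × Int) × List (Int × Int)) (p : Int × Int) :
    List (Int × Int) × List (Int × Int) :=
  match pvHeapPop st.2 with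
  | none => st   -- Python: IndexError on an empty heap; excluded by Pre_
  | some (mn, rest) =>
      (PySem.List.pySetD st.1 p.1 (p.2, mn.2), rest ++ [(mn.1 + p.2, mn.2)])

def distribute_buffer_sizes (buffer_sizes : List Int) (group_size : Int) : List (Int × Int) :=
  let aligned_buffer_sizes :=
    buffer_sizes.map (fun b => PySem.Int.floordiv (b + 64 - 1) 64 * 64)
  let buffer_size_ranks := List.replicate buffer_sizes.length ((-1 : Int), (-1 : Int))
  let allocated_buffer_sizes :=
    (PySem.List.pyRange 0 group_size 1).map (fun g => ((0 : Int), g))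
  ((PySem.List.sorted (PySem.List.enumerate aligned_buffer_sizes) (fun p => p.2) true).foldl
      pvStepA (buffer_size_ranks, allocated_buffer_sizes)).1

-- ===== PORT B =====
-- loop body of B: rank = allocated.index(min(allocated)), then bump that rank's load
def pvStepB (st : List (Int × Int) × List Int) (p : Int × Int) :
    List (Int × Int) × List Int :=
  match PySem.List.min? st.2 (fun x => x) with
  | none => st   -- Python: ValueError, min of an empty list; excluded by Pre_
  | some m =>
      match PySem.List.index? st.2 m with
      | none => st   -- unreachable: min(allocated) is in allocated
      | some g =>
          (PySem.List.pySetD st.1 p.1 (p.2, (g : Int)),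
           PySem.List.pySetD st.2 (g : Int) (PySem.List.pyGetD st.2 (g : Int) 0 + p.2))

def distribute_buffer_sizes_alt (buffer_sizes : List Int) (group_size : Int) : List (Int × Int) :=
  let aligned := buffer_sizes.map (fun b => PySem.Int.floordiv (b + 64 - 1) 64 * 64)
  let result := List.replicate buffer_sizes.length ((-1 : Int), (-1 : Int))
  let allocated := List.replicate group_size.toNat (0 : Int)
  ((PySem.List.sorted (PySem.List.enumerate aligned) (fun p => p.2) true).foldl
      pvStepB (result, allocated)).1

-- ===== PRECONDITION & SPEC =====
-- Pre_ excludes non-positive group_size with a non-empty buffer list: there A raises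
-- IndexError (heappop from an empty heap) and B raises ValueError (min of an empty list).
def Pre_distribute_buffer_sizes (buffer_sizes : List Int) (group_size : Int) : Prop :=
  buffer_sizes = [] ∨ 1 ≤ group_size
instance (buffer_sizes : List Int) (group_size : Int) : Decidable (Pre_distribute_buffer_sizes buffer_sizes group_size) := by unfold Pre_distribute_buffer_sizes; infer_instance

def pvWitness_distribute_buffer_sizes : List Int × Int := ([128, 64, 500, 256], 2)

def Spec_distribute_buffer_sizes (buffer_sizes : List Int) (group_size : Int) (out : List (Int × Int)) : Prop := out = distribute_buffer_sizes_alt buffer_sizes group_size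
instance (buffer_sizes : List Int) (group_size : Int) (out : List (Int × Int)) : Decidable (Spec_distribute_buffer_sizes buffer_sizes group_size out) := by unfold Spec_distribute_buffer_sizes; infer_instance

-- ===== CLAIM (what is proved, stated in full; the proofs are below) =====
def Claim_equal_distribute_buffer_sizes : Prop := ∀ (buffer_sizes : List Int) (group_size : Int), Dom_distribute_buffer_sizes buffer_sizes group_size → Pre_distribute_buffer_sizes buffer_sizes group_size → Spec_distribute_buffer_sizes buffer_sizes group_size (distribute_buffer_sizes buffer_sizes group_size)

-- ===== LEMMAS AND PROOFS =====

-- Python's tuple order on (load, rank) pairs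
def pvLexLE (p q : Int × Int) : Prop := p.1 < q.1 ∨ (p.1 = q.1 ∧ p.2 ≤ q.2)

lemma pvLexLE_antisymm {p q : Int × Int} (h1 : pvLexLE p q) (h2 : pvLexLE q p) : p = q := by
  rcases p with ⟨a, b⟩; rcases q with ⟨c, d⟩
  simp only [pvLexLE, Prod.mk.injEq] at *
  omega

lemma pvLexLE_trans {p q r : Int × Int} (h1 : pvLexLE p q) (h2 : pvLexLE q r) : pvLexLE p r := by
  unfold pvLexLE at *; omega

-- min2?'s fold absorbs the second element of the list into the accumulator
lemma pvMin2_cons (x y : Int × Int) (t : List (Int × Int)) :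
    PySem.List.min2? (x :: y :: t) Prod.fst Prod.snd =
      PySem.List.min2? ((if y.1 < x.1 ∨ (y.1 ≤ x.1 ∧ y.2 < x.2) then y else x) :: t) Prod.fst Prod.snd := by
  simp only [PySem.List.min2?, List.foldl_cons]
  simp only [decide_eq_true_eq, Bool.or_eq_true, Bool.and_eq_true, Bool.not_eq_eq_eq_not,
    Bool.not_true, decide_eq_false_iff_not]
  split_ifs <;> first | rfl | (exfalso; omega)

-- min2? on a nonempty list returns a member that is lexicographically ≤ all members
lemma pvMin2_spec (h : List (Int × Int)) (hne : h ≠ []) :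
    ∃ m, PySem.List.min2? h Prod.fst Prod.snd = some m ∧ m ∈ h ∧ ∀ y ∈ h, pvLexLE m y := by
  cases h with
  | nil => exact absurd rfl hne
  | cons x t =>
    clear hne
    induction t generalizing x with
    | nil =>
        exact ⟨x, rfl, List.mem_singleton_self x, by
          intro y hy; rw [List.mem_singleton.mp hy]; unfold pvLexLE; omega⟩
    | cons y t ih =>
        rw [pvMin2_cons]
        set w := if y.1 < x.1 ∨ (y.1 ≤ x.1 ∧ y.2 < x.2) then y else x with hw
        obtain ⟨m, hm, hmem, hall⟩ := ih w
        have hwx : pvLexLE w x ∧ pvLexLE w y := by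
          unfold pvLexLE
          by_cases hc : y.1 < x.1 ∨ (y.1 ≤ x.1 ∧ y.2 < x.2) <;> simp [hw, hc] <;> omega
        refine ⟨m, hm, ?_, ?_⟩
        · rcases List.mem_cons.mp hmem with h | h
          · subst h
            by_cases hc : y.1 < x.1 ∨ (y.1 ≤ x.1 ∧ y.2 < x.2) <;> simp [hw, hc]
          · exact List.mem_cons_of_mem _ (List.mem_cons_of_mem _ h)
        · intro z hz
          have hmw : pvLexLE m w := hall w (List.mem_cons_self)
          rcases List.mem_cons.mp hz with h | h
          · exact h ▸ pvLexLE_trans hmw hwx.1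
          · rcases List.mem_cons.mp h with h' | h'
            · exact h' ▸ pvLexLE_trans hmw hwx.2
            · exact hall z (List.mem_cons_of_mem _ h')

lemma pvMin2_eq {h : List (Int × Int)} {m : Int × Int} (hm : m ∈ h)
    (hall : ∀ y ∈ h, pvLexLE m y) : PySem.List.min2? h Prod.fst Prod.snd = some m := by
  obtain ⟨m', hm', hmem', hall'⟩ := pvMin2_spec h (List.ne_nil_of_mem hm)
  rw [hm', pvLexLE_antisymm (hall' m hm) (hall m' hmem')]

-- the heap's load list, indexed by rank: [(alloc[0], 0), (alloc[1], 1), …]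
def pvPairs (alloc : List Int) : List (Int × Int) :=
  (List.range alloc.length).map (fun i => (alloc.getD i 0, (i : Int)))

lemma pvPairs_length (alloc : List Int) : (pvPairs alloc).length = alloc.length := by
  simp [pvPairs]

lemma pvPairs_getElem (alloc : List Int) (k : Nat) (hk : k < (pvPairs alloc).length) :
    (pvPairs alloc)[k] = (alloc.getD k 0, (k : Int)) := by
  simp [pvPairs]

lemma mem_pvPairs {alloc : List Int} {y : Int × Int} :
    y ∈ pvPairs alloc ↔ ∃ k : Nat, k < alloc.length ∧ y = (alloc.getD k 0, (k : Int)) := by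
  simp [pvPairs, eq_comm]

lemma pvPairs_nodup (alloc : List Int) : (pvPairs alloc).Nodup := by
  apply List.Nodup.map_on _ (List.nodup_range)
  intro x _ y _ hxy
  simpa using congrArg Prod.snd hxy

lemma pvPairs_set (alloc : List Int) (g : Nat) (v : Int) (hg : g < alloc.length) :
    pvPairs (alloc.set g v) = (pvPairs alloc).set g (v, (g : Int)) := by
  apply List.ext_getElem
  · simp [pvPairs]
  · intro k h1 h2
    simp only [pvPairs, List.getElem_set, List.getElem_map, List.getElem_range]
    by_cases hk : k = g
    · simp [hk, List.getD_eq_getElem?_getD, hg]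
    · have : g ≠ k := fun h => hk h.symm
      simp [this, List.getD_eq_getElem?_getD]

lemma pvSet_perm {α : Type} (l : List α) (g : Nat) (v : α) (hg : g < l.length) :
    (l.set g v).Perm (v :: l.eraseIdx g) := by
  rw [List.set_eq_take_append_cons_drop, if_pos hg, List.eraseIdx_eq_take_drop_succ]
  exact List.perm_middle

-- one loop iteration: equal result rows, and the heap stays the per-rank load list
lemma pvStep_eq (res : List (Int × Int)) (h : List (Int × Int)) (alloc : List Int)
    (p : Int × Int) (hne : alloc ≠ []) (hp : h.Perm (pvPairs alloc)) :
    ∃ res' h' alloc', pvStepA (res, h) p = (res', h') ∧ pvStepB (res, alloc) p = (res', alloc') ∧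
      alloc' ≠ [] ∧ h'.Perm (pvPairs alloc') := by
  cases hmin : PySem.List.min? alloc (fun x => x) with
  | none => exact absurd ((PySem.List.min?_eq_none_iff _ _).mp hmin) hne
  | some m =>
  have hmem : m ∈ alloc := PySem.List.min?_mem hmin
  have hmin' : ∀ y ∈ alloc, m ≤ y := fun y hy => PySem.List.min?_isMin hmin y hy
  cases hidx : PySem.List.index? alloc m with
  | none => exact absurd (List.idxOf?_eq_none_iff.mp hidx) (by simpa using hmem)
  | some g =>
  obtain ⟨hg, hgm, hfirst⟩ := List.idxOf?_eq_some_iff.mp hidx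
  have hgd : alloc.getD g 0 = m := by
    rw [List.getD_eq_getElem?_getD, List.getElem?_eq_getElem hg, Option.getD_some, hgm]
  have hmg : ((m : Int), (g : Int)) ∈ h := by
    rw [hp.mem_iff, mem_pvPairs]; exact ⟨g, hg, by rw [hgd]⟩
  have hall : ∀ y ∈ h, pvLexLE ((m : Int), (g : Int)) y := by
    intro y hy
    rw [hp.mem_iff, mem_pvPairs] at hy
    obtain ⟨k, hk, rfl⟩ := hy
    have hmk : m ≤ alloc.getD k 0 := by
      apply hmin'
      rw [List.getD_eq_getElem?_getD, List.getElem?_eq_getElem hk, Option.getD_some]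
      exact List.getElem_mem hk
    rcases lt_or_eq_of_le hmk with hlt | heq
    · exact Or.inl hlt
    · have hk' : alloc[k] = m := by
        rw [List.getD_eq_getElem?_getD, List.getElem?_eq_getElem hk, Option.getD_some] at heq
        exact heq.symm
      refine Or.inr ⟨heq, ?_⟩
      have hgk : g ≤ k := by
        by_contra hgt
        exact hfirst k (by omega) hk'
      simpa using hgk
  have hpop : pvHeapPop h = some (((m : Int), (g : Int)), h.erase ((m : Int), (g : Int))) := by
    unfold pvHeapPop; rw [pvMin2_eq hmg hall]
  refine ⟨PySem.List.pySetD res p.1 (p.2, (g : Int)),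
          h.erase ((m : Int), (g : Int)) ++ [(m + p.2, (g : Int))],
          alloc.set g (m + p.2), ?_, ?_, ?_, ?_⟩
  · simp only [pvStepA, hpop]
  · simp only [pvStepB, hmin, hidx, PySem.List.pySetD_natCast, PySem.List.pyGetD_natCast, hgd]
  · simpa using List.ne_nil_of_length_pos (by simpa using List.length_pos_of_ne_nil hne)
  · have hg' : g < (pvPairs alloc).length := by rw [pvPairs_length]; exact hg
    have e0 : (pvPairs alloc).erase ((m : Int), (g : Int)) = (pvPairs alloc).eraseIdx g := by
      have h2 := (pvPairs_nodup alloc).erase_getElem g hg'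
      rwa [pvPairs_getElem _ _ hg', hgd] at h2
    have e1 : (h.erase ((m : Int), (g : Int))).Perm ((pvPairs alloc).eraseIdx g) :=
      e0 ▸ hp.erase _
    rw [pvPairs_set _ _ _ hg]
    exact ((List.perm_append_singleton _ _).trans (e1.cons _)).trans (pvSet_perm _ _ _ hg').symm

lemma pvLoop_eq (order : List (Int × Int)) :
    ∀ (res : List (Int × Int)) (h : List (Int × Int)) (alloc : List Int),
      alloc ≠ [] → h.Perm (pvPairs alloc) →
      (order.foldl pvStepA (res, h)).1 = (order.foldl pvStepB (res, alloc)).1 := by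
  induction order with
  | nil => intro res h alloc _ _; rfl
  | cons p t ih =>
      intro res h alloc hne hp
      obtain ⟨res', h', alloc', hA, hB, hne', hp'⟩ := pvStep_eq res h alloc p hne hp
      simp only [List.foldl_cons, hA, hB]
      exact ih res' h' alloc' hne' hp'

-- the initial heap [(0, g) for g in range(group_size)] is the load list of [0] * group_size
lemma pvInit_eq (gs : Int) (hgs : 1 ≤ gs) :
    ((PySem.List.pyRange 0 gs 1).map (fun g => ((0 : Int), g))) =
      pvPairs (List.replicate gs.toNat 0) := by
  rw [show gs = ((gs.toNat : Nat) : Int) from (Int.toNat_of_nonneg (by omega)).symm,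
    PySem.List.pyRange_zero_natCast, List.map_map]
  unfold pvPairs
  rw [List.length_replicate]
  apply List.map_congr_left
  intro i hi
  rw [List.mem_range] at hi
  have hlt : (i : Int) < gs := by omega
  simp [List.getD_eq_getElem?_getD, hlt]

-- ===== VERDICT (by name: the statement is the Claim_ definition above) =====
theorem distribute_buffer_sizes_spec : Claim_equal_distribute_buffer_sizes := by
  intro bs gs _dom hpre
  unfold Spec_distribute_buffer_sizes
  rcases hpre with hbs | hgs
  · subst hbs; rfl
  · unfold distribute_buffer_sizes distribute_buffer_sizes_alt
    refine pvLoop_eq _ _ _ _ ?_ ?_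
    · simp; omega
    · rw [pvInit_eq gs hgs]
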